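-- pv_equiv track=rewrite | github.com/chirag167/Blazar-Nucleosynthesis | core/reactions.py | _stoich_to_compact_label
-- ===== SOURCE A (Python) =====
-- from typing import Dict, Iterable, List, Mapping, Optional, Sequence, Tuple, Union
--
-- ALIAS_TO_CANONICAL_SPECIES: Dict[str, str] = {
--     "a": "4He",
-- }
--
-- def canonical_species_name(name: str) -> str:
--     s = str(name).strip()
--     return ALIAS_TO_CANONICAL_SPECIES.get(s, s)
--
-- def _stoich_to_compact_label(stoich: Mapping[str, int]) -> str:
--     """
--     Convert stoichiometry back to a compact ejectile label.
--     Examples: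
--         {"n": 3, "p": 3} -> "3n3p"
--         {"d": 1, "n": 1} -> "dn"
--
--     Order preference is physically conventional and stable for filenames/display.
--     """
--     order = ["alpha", "4He", "3He", "t", "d", "n", "p"]
--
--     # Use canonical names in output.
--     canon = {canonical_species_name(k): int(v) for k, v in stoich.items() if int(v) != 0}
--
--     parts = []
--     for tok in order:
--         ctok = canonical_species_name(tok)
--         if ctok in canon:
--             count = canon.pop(ctok)
--             if count == 1:
--                 # preserve "alpha" only if original token truly exists in stoich
--                 parts.append(ctok)
--             else:
--                 parts.append(f"{count}{ctok}")
--
--     for species in sorted(canon):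
--         count = canon[species]
--         if count == 1:
--             parts.append(species)
--         else:
--             parts.append(f"{count}{species}")
--
--     return "".join(parts)
-- ===== SOURCE B (Python) =====
-- ORDER = ["alpha", "4He", "3He", "t", "d", "n", "p"]
-- RANK = {s: i for i, s in enumerate(ORDER)}
--
--
-- def canonical_species_name(name: str) -> str:
--     s = str(name).strip()
--     return "4He" if s == "a" else s
--
--
-- def _stoich_to_compact_label(stoich) -> str:
--     canon = {canonical_species_name(k): int(v) for k, v in stoich.items() if int(v) != 0}
--     items = sorted(canon.items(), key=lambda it: (RANK.get(it[0], len(ORDER)), it[0]))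
--     return "".join(s if c == 1 else f"{c}{s}" for s, c in items)
-- ===== Notes on version B (the rewrite author's own statement) =====
-- stated objective: simpler
-- what changed: A's fixed-order scan with dict pops followed by a second loop over the sorted leftover species is replaced by a single sort of all canon items under the composite key (preferred-token rank, species name), emitted in one pass.
import Mathlib
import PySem

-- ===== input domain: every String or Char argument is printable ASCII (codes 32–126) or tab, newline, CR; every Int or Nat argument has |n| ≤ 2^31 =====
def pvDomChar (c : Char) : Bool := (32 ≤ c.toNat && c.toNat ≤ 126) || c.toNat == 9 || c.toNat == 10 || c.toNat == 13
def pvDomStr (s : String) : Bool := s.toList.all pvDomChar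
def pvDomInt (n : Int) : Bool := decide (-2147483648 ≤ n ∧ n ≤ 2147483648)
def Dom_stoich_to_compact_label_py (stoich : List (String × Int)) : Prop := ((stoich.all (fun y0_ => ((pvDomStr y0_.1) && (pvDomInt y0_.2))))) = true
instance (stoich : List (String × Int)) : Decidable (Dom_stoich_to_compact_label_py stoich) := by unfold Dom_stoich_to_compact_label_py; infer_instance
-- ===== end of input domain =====

-- B replaces A's fixed-order pop loop plus second sorted-leftover loop by ONE sort of all
-- items under the composite key (preferred rank, species name); objective: simpler.

-- ===== PORT A =====
-- ALIAS_TO_CANONICAL_SPECIES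
def pvAliasDict : PySem.Dict String String := PySem.Dict.ofList [("a", "4He")]

-- canonical_species_name (A's version: alias-dict lookup with default)
def pvCanonA (name : String) : String :=
  let s := PySem.Str.strip name
  pvAliasDict.getD s s

-- the shared canon-dict comprehension {canonical(k): v for k, v in stoich.items() if v != 0},
-- parameterized by the canonicalization function (A and B canonicalize with different code)
def pvCanonDict (c : String → String) (stoich : List (String × Int)) : PySem.Dict String Int :=
  stoich.foldl (fun d kv => if kv.2 ≠ 0 then d.insert (c kv.1) kv.2 else d) PySem.Dict.empty

-- the 'count == 1' formatting used at every append site of both Pythons;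
-- parts are kept as List Char and ''.join is PySem.Chars.join []
def pvFmt (count : Int) (species : String) : List Char :=
  if count = 1 then species.toList else PySem.Int.toChars count ++ species.toList

def pvOrderList : List String := ["alpha", "4He", "3He", "t", "d", "n", "p"]

-- canon.pop(ctok) is ported as getD + erase (the key is present at that point);
-- canon[species] in the second loop is ported as getD (every sorted key is present)
def stoich_to_compact_label_py (stoich : List (String × Int)) : String :=
  let canon := pvCanonDict pvCanonA stoich
  let st := pvOrderList.foldl
    (fun (st : List (List Char) × PySem.Dict String Int) tok =>
      let ctok := pvCanonA tok
      if st.2.contains ctok then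
        (st.1 ++ [pvFmt (st.2.getD ctok 0) ctok], st.2.erase ctok)
      else st)
    ([], canon)
  let parts := (PySem.List.sorted st.2.keys (fun k => k)).foldl
    (fun acc species => acc ++ [pvFmt (st.2.getD species 0) species]) st.1
  String.mk (PySem.Chars.join [] parts)

-- ===== PORT B =====
-- canonical_species_name (B's version: a direct comparison, no dict)
def pvCanonB (name : String) : String :=
  let s := PySem.Str.strip name
  if s = "a" then "4He" else s

-- RANK = {s: i for i, s in enumerate(ORDER)}
def pvRankDict : PySem.Dict String Int :=
  PySem.Dict.ofList [("alpha", 0), ("4He", 1), ("3He", 2), ("t", 3), ("d", 4), ("n", 5), ("p", 6)]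

-- RANK.get(s, len(ORDER))
def pvRank (s : String) : Int := pvRankDict.getD s 7

def stoich_to_compact_label_py_alt (stoich : List (String × Int)) : String :=
  let canon := pvCanonDict pvCanonB stoich
  let items := PySem.List.sorted2 canon.items (fun it => pvRank it.1) (fun it => it.1)
  String.mk (PySem.Chars.join [] (items.map (fun it => pvFmt it.2 it.1)))

-- ===== PRECONDITION & SPEC =====
def Spec_stoich_to_compact_label_py (stoich : List (String × Int)) (out : String) : Prop := out = stoich_to_compact_label_py_alt stoich
instance (stoich : List (String × Int)) (out : String) : Decidable (Spec_stoich_to_compact_label_py stoich out) := by unfold Spec_stoich_to_compact_label_py; infer_instance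

-- ===== CLAIM (what is proved, stated in full; the proofs are below) =====
def Claim_equal_stoich_to_compact_label_py : Prop := ∀ (stoich : List (String × Int)), Dom_stoich_to_compact_label_py stoich → Spec_stoich_to_compact_label_py stoich (stoich_to_compact_label_py stoich)

-- ===== LEMMAS AND PROOFS =====

-- the two canonicalization functions agree
lemma pvCanonAB : pvCanonA = pvCanonB := by
  funext s
  have hi : pvAliasDict.items = [("a", "4He")] := by decide
  simp only [pvCanonA, pvCanonB, PySem.Dict.getD, PySem.Dict.get?, hi]
  by_cases h : PySem.Str.strip s = "a"
  · rw [List.find?_cons_of_pos (by simp [h])]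
    simp [h]
  · rw [List.find?_cons_of_neg (by simp [Ne.symm h])]
    simp [h]

-- the canon dict has Nodup keys
lemma pvCanonDict_nodup (c : String → String) (stoich : List (String × Int)) :
    (pvCanonDict c stoich).keys.Nodup := by
  unfold pvCanonDict
  suffices h : ∀ (l : List (String × Int)) (d : PySem.Dict String Int), d.keys.Nodup →
      (l.foldl (fun d kv => if kv.2 ≠ 0 then d.insert (c kv.1) kv.2 else d) d).keys.Nodup by
    exact h stoich PySem.Dict.empty PySem.Dict.nodup_keys_empty
  intro l
  induction l with
  | nil => intro d hd; exact hd
  | cons kv rest ih =>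
      intro d hd
      simp only [List.foldl_cons]
      by_cases hz : kv.2 ≠ 0
      · rw [if_pos hz]; exact ih _ (PySem.Dict.nodup_keys_insert d _ _ hd)
      · rw [if_neg hz]; exact ih _ hd

-- lookups through a key-filtered item list are unchanged for keys the filter keeps
lemma pvFind_filter (l : List (String × Int)) (p : String × Int → Bool) (k : String)
    (h : ∀ a : String × Int, a.1 = k → p a = true) :
    (l.filter p).find? (fun a => a.1 == k) = l.find? (fun a => a.1 == k) := by
  rw [List.find?_filter]
  congr 1
  funext a
  by_cases ha : a.1 = k
  · simp [ha, h a ha]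
  · simp [ha]

lemma pvGetD_erase_of_ne (d : PySem.Dict String Int) (k t : String) (v : Int) (h : t ≠ k) :
    (d.erase k).getD t v = d.getD t v := by
  simp only [PySem.Dict.erase, PySem.Dict.getD, PySem.Dict.get?]
  rw [pvFind_filter]
  intro a ha
  simp [ha, h]

lemma pvContains_erase_of_ne (d : PySem.Dict String Int) (k t : String) (h : t ≠ k) :
    (d.erase k).contains t = d.contains t := by
  simp only [PySem.Dict.erase, PySem.Dict.contains, List.any_filter]
  congr 1
  funext a
  by_cases ha : a.1 = t
  · simp [ha, h]
  · simp [ha]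

lemma pvGetD_filter_not_mem (d : PySem.Dict String Int) (toks : List String) (k : String)
    (v : Int) (h : k ∉ toks) :
    (PySem.Dict.mk (d.items.filter (fun p => !decide (p.1 ∈ toks)))).getD k v = d.getD k v := by
  simp only [PySem.Dict.getD, PySem.Dict.get?]
  rw [pvFind_filter]
  intro a ha
  simp [ha, h]

-- A's first loop, abstracted over the current token
def pvStepA (st : List (List Char) × PySem.Dict String Int) (tok : String) :
    List (List Char) × PySem.Dict String Int :=
  if st.2.contains tok then
    (st.1 ++ [pvFmt (st.2.getD tok 0) tok], st.2.erase tok)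
  else st

lemma pvLoop1 (toks : List String) (d : PySem.Dict String Int) (p0 : List (List Char))
    (hnd : toks.Nodup) :
    toks.foldl pvStepA (p0, d) =
      (p0 ++ (toks.filter d.contains).map (fun t => pvFmt (d.getD t 0) t),
       PySem.Dict.mk (d.items.filter (fun p => !decide (p.1 ∈ toks)))) := by
  induction toks generalizing d p0 with
  | nil =>
      refine Prod.ext (by simp) ?_
      have : (fun (p : String × Int) => !decide (p.1 ∈ ([] : List String))) = fun _ => true := by
        funext p; simp
      show d = PySem.Dict.mk (d.items.filter _)
      rw [this, List.filter_true]
  | cons tok rest ih =>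
      obtain ⟨htok, hrest⟩ := List.nodup_cons.mp hnd
      simp only [List.foldl_cons]
      by_cases hc : d.contains tok = true
      · have hstep : pvStepA (p0, d) tok
            = (p0 ++ [pvFmt (d.getD tok 0) tok], d.erase tok) := by
          simp [pvStepA, hc]
        rw [hstep, ih _ _ hrest]
        refine Prod.ext ?_ ?_
        · show (p0 ++ [pvFmt (d.getD tok 0) tok]) ++
              ((rest.filter (d.erase tok).contains).map
                (fun t => pvFmt ((d.erase tok).getD t 0) t)) = _
          have hfc : rest.filter (d.erase tok).contains = rest.filter d.contains := by
            apply List.filter_congr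
            intro t ht
            exact pvContains_erase_of_ne d tok t (fun he => htok (he ▸ ht))
          have hmc : (rest.filter d.contains).map (fun t => pvFmt ((d.erase tok).getD t 0) t)
              = (rest.filter d.contains).map (fun t => pvFmt (d.getD t 0) t) := by
            apply List.map_congr_left
            intro t ht
            have ht' : t ∈ rest := (List.mem_filter.mp ht).1
            rw [pvGetD_erase_of_ne d tok t 0 (fun he => htok (he ▸ ht'))]
          rw [hfc, hmc]
          simp [hc]
        · show PySem.Dict.mk (((d.erase tok).items).filter (fun p => !decide (p.1 ∈ rest))) = _
          have : ((d.erase tok).items).filter (fun p => !decide (p.1 ∈ rest))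
              = d.items.filter (fun p => !decide (p.1 ∈ tok :: rest)) := by
            show (d.items.filter (fun p => !(p.1 == tok))).filter (fun p => !decide (p.1 ∈ rest)) = _
            rw [List.filter_filter]
            apply List.filter_congr
            intro p _
            by_cases h1 : p.1 = tok <;> by_cases h2 : p.1 ∈ rest <;> simp [h1, h2]
          rw [this]
      · have hstep : pvStepA (p0, d) tok = (p0, d) := by simp [pvStepA, hc]
        rw [hstep, ih _ _ hrest]
        have hkeys : ∀ p ∈ d.items, p.1 ≠ tok := by
          intro p hp he
          apply hc
          simp only [PySem.Dict.contains, List.any_eq_true]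
          exact ⟨p, hp, by simp [he]⟩
        refine Prod.ext ?_ ?_
        · simp [hc]
        · show PySem.Dict.mk (d.items.filter (fun p => !decide (p.1 ∈ rest))) = _
          have : d.items.filter (fun p => !decide (p.1 ∈ rest))
              = d.items.filter (fun p => !decide (p.1 ∈ tok :: rest)) := by
            apply List.filter_congr
            intro p hp
            simp [List.mem_cons, hkeys p hp]
          rw [this]

-- sorted2 with keys (k1, k2) is sorted with the lexicographic key
lemma pvSorted2_eq {α : Type} (xs : List α) (k1 : α → Int) (k2 : α → String) :
    PySem.List.sorted2 xs k1 k2 =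
      PySem.List.sorted xs (fun x => toLex (k1 x, k2 x)) := by
  rw [PySem.List.sorted_eq_foldl_insertBy]
  simp only [PySem.List.sorted2]
  congr 1
  funext acc x
  congr 1
  funext a b
  simp only [Prod.Lex.toLex_lt_toLex]
  rcases lt_trichotomy (k1 a) (k1 b) with h | h | h
  · simp [h, asymm h]
  · simp [h]
  · simp [h, asymm h, (ne_of_gt h)]

lemma pvRank_of_not_mem (k : String) (h : k ∉ pvOrderList) : pvRank k = 7 := by
  simp only [pvOrderList, List.mem_cons, not_or, List.not_mem_nil] at h
  obtain ⟨h1, h2, h3, h4, h5, h6, h7, -⟩ := h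
  have hi : pvRankDict.items = [("alpha", (0 : Int)), ("4He", 1), ("3He", 2), ("t", 3),
      ("d", 4), ("n", 5), ("p", 6)] := by decide
  simp only [pvRank, PySem.Dict.getD, PySem.Dict.get?, hi]
  have hnone : List.find? (fun p => p.1 == k) [("alpha", (0 : Int)), ("4He", 1), ("3He", 2),
      ("t", 3), ("d", 4), ("n", 5), ("p", 6)] = none := by
    rw [List.find?_eq_none]
    intro x hx
    simp only [List.mem_cons, List.not_mem_nil, or_false] at hx
    rcases hx with rfl | rfl | rfl | rfl | rfl | rfl | rfl
    · simpa using Ne.symm h1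
    · simpa using Ne.symm h2
    · simpa using Ne.symm h3
    · simpa using Ne.symm h4
    · simpa using Ne.symm h5
    · simpa using Ne.symm h6
    · simpa using Ne.symm h7
  rw [hnone]
  rfl

lemma pvRank_le_of_mem (t : String) (h : t ∈ pvOrderList) : pvRank t ≤ 6 := by
  simp only [pvOrderList, List.mem_cons, List.not_mem_nil, or_false] at h
  rcases h with rfl | rfl | rfl | rfl | rfl | rfl | rfl <;> decide

-- the crux: B's single sort produces exactly A's order-tokens-then-sorted-rest arrangement
lemma pvSortedItems (d : PySem.Dict String Int) (hnd : d.keys.Nodup) :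
    PySem.List.sorted d.items (fun it => toLex (pvRank it.1, it.1)) =
      (pvOrderList.filter d.contains).map (fun t => (t, d.getD t 0)) ++
        (PySem.List.sorted (d.keys.filter (fun k => !decide (k ∈ pvOrderList)))
          (fun k => k)).map (fun k => (k, d.getD k 0)) := by
  apply PySem.List.sorted_eq_of_perm_of_pairwise_lt
  · -- permutation of d.items
    rw [← List.map_append, PySem.Dict.items_eq_map_keys d hnd 0]
    apply List.Perm.map
    have h1 : (pvOrderList.filter d.contains).Perm
        (d.keys.filter (fun k => decide (k ∈ pvOrderList))) := by
      rw [List.perm_ext_iff_of_nodup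
        (List.Nodup.filter _ (by decide)) (List.Nodup.filter _ hnd)]
      intro t
      simp [List.mem_filter, PySem.Dict.contains_iff_mem_keys, and_comm]
    have h2 := PySem.List.sorted_perm (d.keys.filter (fun k => !decide (k ∈ pvOrderList)))
      (fun k => k) false
    exact (h1.append h2).trans (List.filter_append_perm _ d.keys)
  · -- strictly increasing under the lexicographic key
    rw [List.pairwise_append]
    refine ⟨?_, ?_, ?_⟩
    · rw [List.pairwise_map]
      have hp : pvOrderList.Pairwise (fun a b => pvRank a < pvRank b) := by decide
      exact (hp.filter _).imp (fun h => Prod.Lex.toLex_lt_toLex.mpr (Or.inl h))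
    · rw [List.pairwise_map]
      have hle : (PySem.List.sorted (d.keys.filter (fun k => !decide (k ∈ pvOrderList)))
          (fun k => k)).Pairwise (fun a b => a ≤ b) :=
        PySem.List.sorted_pairwise _ (fun k => k)
      have hnodup : (PySem.List.sorted (d.keys.filter (fun k => !decide (k ∈ pvOrderList)))
          (fun k => k)).Pairwise (fun a b => a ≠ b) :=
        ((PySem.List.sorted_perm _ _ _).nodup_iff).mpr (List.Nodup.filter _ hnd)
      refine List.Pairwise.imp_of_mem ?_ (hle.and hnodup)
      intro a b ha hb hab
      have ha' : a ∉ pvOrderList := by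
        have := (PySem.List.mem_sorted _ _ _ _).mp ha
        simpa using (List.mem_filter.mp this).2
      have hb' : b ∉ pvOrderList := by
        have := (PySem.List.mem_sorted _ _ _ _).mp hb
        simpa using (List.mem_filter.mp this).2
      refine Prod.Lex.toLex_lt_toLex.mpr (Or.inr ⟨?_, lt_of_le_of_ne hab.1 hab.2⟩)
      show pvRank a = pvRank b
      rw [pvRank_of_not_mem a ha', pvRank_of_not_mem b hb']
    · intro x hx y hy
      obtain ⟨t, ht, rfl⟩ := List.mem_map.mp hx
      obtain ⟨k, hk, rfl⟩ := List.mem_map.mp hy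
      have ht' : t ∈ pvOrderList := (List.mem_filter.mp ht).1
      have hk' : k ∉ pvOrderList := by
        have := (PySem.List.mem_sorted _ _ _ _).mp hk
        simpa using (List.mem_filter.mp this).2
      refine Prod.Lex.toLex_lt_toLex.mpr (Or.inl ?_)
      show pvRank t < pvRank k
      have := pvRank_le_of_mem t ht'
      rw [pvRank_of_not_mem k hk']
      omega

lemma pvMain (stoich : List (String × Int)) :
    stoich_to_compact_label_py stoich = stoich_to_compact_label_py_alt stoich := by
  unfold stoich_to_compact_label_py stoich_to_compact_label_py_alt
  rw [← pvCanonAB]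
  have hnd : (pvCanonDict pvCanonA stoich).keys.Nodup := pvCanonDict_nodup _ _
  generalize pvCanonDict pvCanonA stoich = d at hnd ⊢
  dsimp only
  -- A's first loop
  have e1 : (fun (st : List (List Char) × PySem.Dict String Int) tok =>
        let ctok := pvCanonA tok
        if st.2.contains ctok then
          (st.1 ++ [pvFmt (st.2.getD ctok 0) ctok], st.2.erase ctok)
        else st)
      = (fun st tok => pvStepA st (pvCanonA tok)) := rfl
  have hmap : pvOrderList.map pvCanonA = pvOrderList := by decide
  have e2 : List.foldl (fun st tok => pvStepA st (pvCanonA tok)) (([] : List (List Char)), d)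
      pvOrderList
      = ([] ++ (pvOrderList.filter d.contains).map (fun t => pvFmt (d.getD t 0) t),
         PySem.Dict.mk (d.items.filter (fun p => !decide (p.1 ∈ pvOrderList)))) := by
    rw [← List.foldl_map, hmap]
    exact pvLoop1 pvOrderList d [] (by decide)
  rw [e1, e2]
  -- A's second loop
  rw [PySem.List.foldl_append_singleton_eq_map]
  -- the leftover dict's keys and lookups
  have hkeys : (PySem.Dict.mk (d.items.filter (fun p => !decide (p.1 ∈ pvOrderList)))).keys
      = d.keys.filter (fun k => !decide (k ∈ pvOrderList)) := by
    rw [PySem.Dict.keys_mk]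
    show List.map (fun x => x.1) (List.filter
        ((fun k => !decide (k ∈ pvOrderList)) ∘ (fun (x : String × Int) => x.1)) d.items) = _
    rw [← List.filter_map]
    simp only [PySem.Dict.keys]
  rw [hkeys]
  have hmc : (PySem.List.sorted (d.keys.filter (fun k => !decide (k ∈ pvOrderList)))
        (fun k => k)).map
      (fun species => pvFmt
        ((PySem.Dict.mk (d.items.filter (fun p => !decide (p.1 ∈ pvOrderList)))).getD species 0)
        species)
      = (PySem.List.sorted (d.keys.filter (fun k => !decide (k ∈ pvOrderList)))
        (fun k => k)).map (fun k => pvFmt (d.getD k 0) k) := by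
    apply List.map_congr_left
    intro k hk
    have hk' : k ∉ pvOrderList := by
      have := (PySem.List.mem_sorted _ _ _ _).mp hk
      simpa using (List.mem_filter.mp this).2
    rw [pvGetD_filter_not_mem d pvOrderList k 0 hk']
  rw [hmc]
  -- B's single sort
  rw [pvSorted2_eq, pvSortedItems d hnd]
  simp only [List.map_append, List.map_map]
  rfl

-- ===== VERDICT (by name: the statement is the Claim_ definition above) =====
theorem stoich_to_compact_label_py_spec : Claim_equal_stoich_to_compact_label_py := by
  intro stoich _
  unfold Spec_stoich_to_compact_label_py
  exact pvMain stoich
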